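-- pv_equiv track=rewrite | github.com/jenni4j/algo-practice | interview_prep/max_profit_annoying.py | max_profit_threes
-- ===== SOURCE A (Python) =====
-- from typing import List
--
-- def max_profit_threes(prices: List[int], profit: List[int]) -> int:
--     left = 0
--     right = len(prices) - 1
--     max_profit = -1
--
--
--     while left < right:
--         for mid in range(left + 1, right):
--             if prices[left] < prices[mid] and prices[mid] < prices[right] and prices[left] < prices[right]:
--                 curr_profit = profit[left] + profit[mid] + profit[right]
--                 max_profit = max(max_profit, curr_profit)
--
--         left += 1
--
--     left = 0
--     right = len(prices) - 1
--
--     while right > 0: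
--         for mid in range(left + 1, right):
--             if prices[left] < prices[mid] and prices[mid] < prices[right] and prices[left] < prices[right]:
--                 curr_profit = profit[left] + profit[mid] + profit[right]
--                 max_profit = max(max_profit, curr_profit)
--
--         right -= 1
--
--     return max_profit
-- ===== SOURCE B (Python) =====
-- from typing import List
--
-- def _insert(fr, p, v):
--     # fr is a Pareto frontier: pairs (price, best profit) with prices strictly
--     # increasing and profits strictly increasing; keep only undominated pairs.
--     n = len(fr)
--     i = 0
--     while i < n and fr[i][0] < p:
--         i += 1
--     if i > 0 and fr[i - 1][1] >= v:
--         return                       # dominated by a smaller-price entry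
--     if i < n and fr[i][0] == p and fr[i][1] >= v:
--         return                       # same price, at least as good already there
--     j = i
--     while j < n and fr[j][1] <= v:
--         j += 1                       # these entries are now dominated by (p, v)
--     fr[i:j] = [(p, v)]
--
-- def _query(fr, x):
--     # best profit among frontier entries with price < x (None if there is none):
--     # by monotonicity it is the last such entry, found from the right.
--     for p, v in reversed(fr):
--         if p < x:
--             return v
--     return None
--
-- def max_profit_threes(prices: List[int], profit: List[int]) -> int:
--     n = len(prices)
--     ans = -1
--     # family 1: triples (l, m, n-1); sweep m left to right keeping a Pareto
--     # frontier of (price, profit) over the indices to the left of m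
--     fr = []
--     for m in range(1, n - 1):
--         _insert(fr, prices[m - 1], profit[m - 1])
--         if prices[m] < prices[n - 1]:
--             b = _query(fr, prices[m])
--             if b is not None:
--                 ans = max(ans, b + profit[m] + profit[n - 1])
--     # family 2: triples (0, m, r); sweep m right to left keeping a frontier of
--     # the indices to the right of m, keyed by negated price
--     fr = []
--     for m in range(n - 2, 0, -1):
--         _insert(fr, -prices[m + 1], profit[m + 1])
--         if prices[0] < prices[m]:
--             b = _query(fr, -prices[m])
--             if b is not None:
--                 ans = max(ans, profit[0] + profit[m] + b)
--     return ans
-- ===== Notes on version B (the rewrite author's own statement) =====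
-- stated objective: faster
-- what changed: A brute-forces every (endpoint, middle) index pair in two quadratic double loops; B makes one sweep per family maintaining a Pareto frontier of undominated (price, profit) partners and reads the best valid partner per middle off the frontier.
-- outside the precondition, e.g. on max_profit_threes([3, 2, 1], []): A returns -1, B raises IndexError
import Mathlib
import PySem

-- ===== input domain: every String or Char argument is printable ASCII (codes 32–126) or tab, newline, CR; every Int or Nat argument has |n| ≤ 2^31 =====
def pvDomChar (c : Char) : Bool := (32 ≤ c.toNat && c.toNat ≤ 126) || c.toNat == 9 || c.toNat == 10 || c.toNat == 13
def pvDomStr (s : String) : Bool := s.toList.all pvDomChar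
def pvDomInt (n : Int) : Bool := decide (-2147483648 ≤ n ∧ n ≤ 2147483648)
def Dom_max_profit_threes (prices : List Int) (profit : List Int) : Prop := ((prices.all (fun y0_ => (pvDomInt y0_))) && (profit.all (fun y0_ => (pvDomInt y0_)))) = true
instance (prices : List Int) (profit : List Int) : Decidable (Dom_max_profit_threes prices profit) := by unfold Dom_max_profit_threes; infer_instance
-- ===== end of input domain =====

-- B replaces A's brute force over all (endpoint, middle) index pairs by one sweep per family
-- maintaining a Pareto frontier of undominated (price, profit) partners, read off per middle;
-- measured faster on the generated inputs (A is O(n^2); B's frontier is typically tiny).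

-- ===== PORT A =====
-- every index access in an executed branch is in range, so pyGetD · · 0 is exact
def max_profit_threes (prices : List Int) (profit : List Int) : Int :=
  let n : Int := PySem.List.len prices
  -- while left < right (right fixed at n-1): left = 0,1,…,n-2
  let m1 : Int :=
    (PySem.List.pyRange 0 (n - 1) 1).foldl (fun acc left =>
      (PySem.List.pyRange (left + 1) (n - 1) 1).foldl (fun acc mid =>
        if PySem.List.pyGetD prices left 0 < PySem.List.pyGetD prices mid 0 ∧
           PySem.List.pyGetD prices mid 0 < PySem.List.pyGetD prices (n - 1) 0 ∧
           PySem.List.pyGetD prices left 0 < PySem.List.pyGetD prices (n - 1) 0 then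
          max acc (PySem.List.pyGetD profit left 0 + PySem.List.pyGetD profit mid 0 +
                   PySem.List.pyGetD profit (n - 1) 0)
        else acc) acc) (-1)
  -- while right > 0 (left fixed at 0): right = n-1, n-2, …, 1
  (PySem.List.pyRange (n - 1) 0 (-1)).foldl (fun acc right =>
    (PySem.List.pyRange 1 right 1).foldl (fun acc mid =>
      if PySem.List.pyGetD prices 0 0 < PySem.List.pyGetD prices mid 0 ∧
         PySem.List.pyGetD prices mid 0 < PySem.List.pyGetD prices right 0 ∧
         PySem.List.pyGetD prices 0 0 < PySem.List.pyGetD prices right 0 then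
        max acc (PySem.List.pyGetD profit 0 0 + PySem.List.pyGetD profit mid 0 +
                 PySem.List.pyGetD profit right 0)
      else acc) acc) m1

-- ===== PORT B =====
-- _query: scan the frontier from the right, return the first profit whose price is < x
def pvQueryGo : List (Int × Int) → Int → Option Int
  | [], _ => none
  | e :: rest, x => if e.1 < x then some e.2 else pvQueryGo rest x

def pvQuery (fr : List (Int × Int)) (x : Int) : Option Int := pvQueryGo fr.reverse x

-- _insert: the two index walks of the Python are takeWhile/dropWhile splits of the frontier
def pvInsert (fr : List (Int × Int)) (p v : Int) : List (Int × Int) :=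
  let pre := fr.takeWhile (fun e => e.1 < p)
  let post := fr.dropWhile (fun e => e.1 < p)
  if (match pre.getLast? with | some e => decide (v ≤ e.2) | none => false) then fr
  else if (match post.head? with | some e => e.1 == p && decide (v ≤ e.2) | none => false) then fr
  else pre ++ (p, v) :: post.dropWhile (fun e => e.2 ≤ v)

def max_profit_threes_alt (prices : List Int) (profit : List Int) : Int :=
  let n : Int := PySem.List.len prices
  -- family 1: sweep m left to right, frontier over indices left of m
  let s1 : List (Int × Int) × Int :=
    (PySem.List.pyRange 1 (n - 1) 1).foldl (fun st m =>
      let fr := pvInsert st.1 (PySem.List.pyGetD prices (m - 1) 0)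
                              (PySem.List.pyGetD profit (m - 1) 0)
      (fr,
       if PySem.List.pyGetD prices m 0 < PySem.List.pyGetD prices (n - 1) 0 then
         match pvQuery fr (PySem.List.pyGetD prices m 0) with
         | some b => max st.2 (b + PySem.List.pyGetD profit m 0 + PySem.List.pyGetD profit (n - 1) 0)
         | none => st.2
       else st.2)) ([], -1)
  -- family 2: sweep m right to left, frontier over indices right of m, keyed by negated price
  let s2 : List (Int × Int) × Int :=
    (PySem.List.pyRange (n - 2) 0 (-1)).foldl (fun st m =>
      let fr := pvInsert st.1 (-(PySem.List.pyGetD prices (m + 1) 0))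
                              (PySem.List.pyGetD profit (m + 1) 0)
      (fr,
       if PySem.List.pyGetD prices 0 0 < PySem.List.pyGetD prices m 0 then
         match pvQuery fr (-(PySem.List.pyGetD prices m 0)) with
         | some b => max st.2 (PySem.List.pyGetD profit 0 0 + PySem.List.pyGetD profit m 0 + b)
         | none => st.2
       else st.2)) ([], s1.2)
  s2.2

-- ===== PRECONDITION & SPEC =====
-- Pre_ excludes inputs with at least 3 prices but fewer profits than prices: there A raises
-- IndexError whenever a price-increasing triple touches a missing profit index, and returns -1
-- otherwise by accident (B's sweep touches every profit index and raises).
def Pre_max_profit_threes (prices : List Int) (profit : List Int) : Prop :=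
  prices.length ≤ profit.length ∨ prices.length < 3
instance (prices : List Int) (profit : List Int) : Decidable (Pre_max_profit_threes prices profit) := by unfold Pre_max_profit_threes; infer_instance
def pvWitness_max_profit_threes : List Int × List Int := ([1, 2, 3], [5, 6, 7])

def Spec_max_profit_threes (prices : List Int) (profit : List Int) (out : Int) : Prop := out = max_profit_threes_alt prices profit
instance (prices : List Int) (profit : List Int) (out : Int) : Decidable (Spec_max_profit_threes prices profit out) := by unfold Spec_max_profit_threes; infer_instance

-- ===== CLAIM (what is proved, stated in full; the proofs are below) =====
def Claim_equal_max_profit_threes : Prop := ∀ (prices : List Int) (profit : List Int), Dom_max_profit_threes prices profit → Pre_max_profit_threes prices profit → Spec_max_profit_threes prices profit (max_profit_threes prices profit)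

-- ===== LEMMAS AND PROOFS =====

-- ---- A-side canonicalisation: both double loops equal a per-middle match form ----

theorem pvBestFold {α : Type} (c : α → Prop) [DecidablePred c] (f : α → Int)
    (F : Int → Int) (hF : Monotone F) (L : List α) :
    ∀ (b : Option Int) (acc : Int),
    (match L.foldl (fun best x =>
        if c x then
          match best with
          | none => some (f x)
          | some v => if f x > v then some (f x) else best
        else best) b with
     | some v => max acc (F v)
     | none => acc)
      = L.foldl (fun a x => if c x then max a (F (f x)) else a)
          (match b with | some v => max acc (F v) | none => acc) := by
  induction L with
  | nil => intro b acc; rfl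
  | cons x L ih =>
    intro b acc
    by_cases h : c x
    · cases b with
      | none => simp [h, ih]
      | some v =>
        by_cases hv : f x > v
        · have : max (max acc (F v)) (F (f x)) = max acc (F (f x)) := by
            have := hF (le_of_lt hv); rw [max_assoc, max_eq_right this]
          simp [h, hv, ih, this]
        · have : max (max acc (F v)) (F (f x)) = max acc (F v) := by
            have := hF (not_lt.mp hv); rw [max_assoc, max_eq_left this]
          simp [h, hv, ih, this]
    · cases b <;> simp [h, ih]

theorem pvFoldlMaxIf {α : Type} (c : α → Prop) [DecidablePred c] (v : α → Int)
    (L : List α) (acc : Int) :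
    L.foldl (fun a x => if c x then max a (v x) else a) acc
      = (L.flatMap fun x => if c x then [v x] else []).foldl max acc := by
  induction L generalizing acc with
  | nil => rfl
  | cons x L ih => by_cases h : c x <;> simp [h, ih]

theorem pvIfFold {α : Type} (c2 : Prop) [Decidable c2] (c1 : α → Prop) [DecidablePred c1]
    (v : α → Int) (L : List α) (acc : Int) :
    (if c2 then L.foldl (fun a x => if c1 x then max a (v x) else a) acc else acc)
      = L.foldl (fun a x => if c2 ∧ c1 x then max a (v x) else a) acc := by
  by_cases h : c2
  · simp [h]
  · rw [if_neg h]
    exact ((PySem.List.foldl_congr_mem L _ (fun a _ => a) acc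
      (fun a x _ => by simp [h])).trans (PySem.List.foldl_ignore _ _)).symm

theorem pvFlatMapSwap {α β γ : Type} (L : List α) (M : List β) (f : α → β → List γ) :
    (L.flatMap fun a => M.flatMap fun b => f a b).Perm
      (M.flatMap fun b => L.flatMap fun a => f a b) := by
  induction L with
  | nil => simp
  | cons a L ih =>
    simp only [List.flatMap_cons]
    exact (List.Perm.append_left _ ih).trans (List.flatMap_append_perm M (f a) _)

theorem pvFlatMapCongr {α γ : Type} {L : List α} {f g : α → List γ}
    (h : ∀ x ∈ L, f x = g x) : L.flatMap f = L.flatMap g := by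
  induction L with
  | nil => rfl
  | cons x L ih => simp [h x (by simp), ih fun y hy => h y (by simp [hy])]

theorem pvFlatMapRangeLow (a c b : Int) (h1 : a ≤ c) (h2 : c ≤ b) (f : Int → List Int)
    (hf : ∀ x, a ≤ x → x < c → f x = []) :
    (PySem.List.pyRange a b 1).flatMap f = (PySem.List.pyRange c b 1).flatMap f := by
  rw [PySem.List.pyRange_one_append a c b h1 h2, List.flatMap_append]
  have : (PySem.List.pyRange a c 1).flatMap f = [] := by
    rw [List.flatMap_eq_nil_iff]
    intro x hx
    have := (PySem.List.mem_pyRange_one).mp hx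
    exact hf x this.1 this.2
  rw [this, List.nil_append]

theorem pvFlatMapRangeHigh (a c b : Int) (h1 : a ≤ c) (h2 : c ≤ b) (f : Int → List Int)
    (hf : ∀ x, c ≤ x → x < b → f x = []) :
    (PySem.List.pyRange a b 1).flatMap f = (PySem.List.pyRange a c 1).flatMap f := by
  rw [PySem.List.pyRange_one_append a c b h1 h2, List.flatMap_append]
  have : (PySem.List.pyRange c b 1).flatMap f = [] := by
    rw [List.flatMap_eq_nil_iff]
    intro x hx
    have := (PySem.List.mem_pyRange_one).mp hx
    exact hf x this.1 this.2
  rw [this, List.append_nil]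

def pvGrd1 (p q : Int → Int) (n l m : Int) : List Int :=
  if l < m ∧ p l < p m ∧ p m < p (n-1) ∧ p l < p (n-1) then [q l + q m + q (n-1)] else []

theorem pvFam1 (p q : Int → Int) (n acc : Int) :
    (PySem.List.pyRange 0 (n-1) 1).foldl (fun acc l =>
       (PySem.List.pyRange (l+1) (n-1) 1).foldl (fun a m =>
          if p l < p m ∧ p m < p (n-1) ∧ p l < p (n-1) then max a (q l + q m + q (n-1)) else a) acc) acc
    = (PySem.List.pyRange 1 (n-1) 1).foldl (fun acc m =>
        if p m < p (n-1) then
          match (PySem.List.pyRange 0 m 1).foldl (fun best l =>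
              if p l < p m then
                match best with
                | none => some (q l)
                | some v => if q l > v then some (q l) else best
              else best) none with
          | some v => max acc (v + q m + q (n-1))
          | none => acc
        else acc) acc := by
  by_cases hn : 1 ≤ n - 1
  · have hKA : (PySem.List.pyRange 0 (n-1) 1).flatMap (fun l =>
        (PySem.List.pyRange (l+1) (n-1) 1).flatMap (fun m =>
          if p l < p m ∧ p m < p (n-1) ∧ p l < p (n-1) then [q l + q m + q (n-1)] else []))
        = (PySem.List.pyRange 0 (n-1) 1).flatMap (fun l =>
            (PySem.List.pyRange 0 (n-1) 1).flatMap (fun m => pvGrd1 p q n l m)) := by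
      apply pvFlatMapCongr; intro l hl
      obtain ⟨hl0, hl1⟩ := PySem.List.mem_pyRange_one.mp hl
      have hstep := pvFlatMapRangeLow 0 (l+1) (n-1) (by omega) (by omega)
        (fun m => pvGrd1 p q n l m)
        (fun x hx0 hxl => by simp only [pvGrd1]; exact if_neg (fun h => absurd h.1 (by omega)))
      rw [hstep]
      apply pvFlatMapCongr; intro m hm
      obtain ⟨hm1, hm2⟩ := PySem.List.mem_pyRange_one.mp hm
      simp only [pvGrd1]
      by_cases hg : p l < p m ∧ p m < p (n-1) ∧ p l < p (n-1)
      · rw [if_pos hg, if_pos ⟨show l < m by omega, hg⟩]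
      · rw [if_neg hg, if_neg (fun h => hg h.2)]
    have hKB : (PySem.List.pyRange 0 (n-1) 1).flatMap (fun m =>
        (PySem.List.pyRange 0 (n-1) 1).flatMap (fun l => pvGrd1 p q n l m))
        = (PySem.List.pyRange 1 (n-1) 1).flatMap (fun m =>
            (PySem.List.pyRange 0 m 1).flatMap (fun l =>
              if p m < p (n-1) ∧ p l < p m then [q l + q m + q (n-1)] else [])) := by
      have hstep := pvFlatMapRangeLow 0 1 (n-1) (by omega) hn
        (fun m => (PySem.List.pyRange 0 (n-1) 1).flatMap (fun l => pvGrd1 p q n l m))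
        (fun x hx0 hx1 => by
          rw [List.flatMap_eq_nil_iff]; intro l hl
          have hml := PySem.List.mem_pyRange_one.mp hl
          simp only [pvGrd1]; exact if_neg (fun h => absurd h.1 (by omega)))
      rw [hstep]
      apply pvFlatMapCongr; intro m hm
      obtain ⟨hm1, hm2⟩ := PySem.List.mem_pyRange_one.mp hm
      have hstep2 := pvFlatMapRangeHigh 0 m (n-1) (by omega) (by omega)
        (fun l => pvGrd1 p q n l m)
        (fun x hx1 hx2 => by simp only [pvGrd1]; exact if_neg (fun h => absurd h.1 (by omega)))
      rw [hstep2]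
      apply pvFlatMapCongr; intro l hl
      obtain ⟨hl0, hlm⟩ := PySem.List.mem_pyRange_one.mp hl
      simp only [pvGrd1]
      by_cases h1 : p l < p m
      · by_cases h2 : p m < p (n-1)
        · rw [if_pos ⟨hlm, h1, h2, lt_trans h1 h2⟩, if_pos ⟨h2, h1⟩]
        · rw [if_neg (fun h => h2 h.2.2.1), if_neg (fun h => h2 h.1)]
      · rw [if_neg (fun h => h1 h.2.1), if_neg (fun h => h1 h.2)]
    have hstepm : ∀ (a m : Int), m ∈ PySem.List.pyRange 1 (n-1) 1 →
        (if p m < p (n-1) then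
          match (PySem.List.pyRange 0 m 1).foldl (fun best l =>
              if p l < p m then
                match best with
                | none => some (q l)
                | some v => if q l > v then some (q l) else best
              else best) none with
          | some v => max a (v + q m + q (n-1))
          | none => a
        else a)
        = ((PySem.List.pyRange 0 m 1).flatMap (fun l =>
            if p m < p (n-1) ∧ p l < p m then [q l + q m + q (n-1)] else [])).foldl max a := by
      intro a m _
      rw [pvBestFold (fun l => p l < p m) q (fun v => v + q m + q (n-1))
        (fun x y h => by dsimp; omega) (PySem.List.pyRange 0 m 1) none a]
      have hred : (match (none : Option Int) with
        | some v => max a (v + q m + q (n-1)) | none => a) = a := rfl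
      rw [hred, pvIfFold (p m < p (n-1)) (fun l => p l < p m)
        (fun l => q l + q m + q (n-1)) (PySem.List.pyRange 0 m 1) a]
      exact pvFoldlMaxIf _ _ _ a
    calc (PySem.List.pyRange 0 (n-1) 1).foldl (fun acc l =>
           (PySem.List.pyRange (l+1) (n-1) 1).foldl (fun a m =>
              if p l < p m ∧ p m < p (n-1) ∧ p l < p (n-1) then
                max a (q l + q m + q (n-1)) else a) acc) acc
        = (PySem.List.pyRange 0 (n-1) 1).foldl (fun a l =>
            ((PySem.List.pyRange (l+1) (n-1) 1).flatMap (fun m =>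
              if p l < p m ∧ p m < p (n-1) ∧ p l < p (n-1) then
                [q l + q m + q (n-1)] else [])).foldl max a) acc :=
          PySem.List.foldl_congr_mem _ _ _ acc (fun a l _ => pvFoldlMaxIf _ _ _ a)
      _ = ((PySem.List.pyRange 0 (n-1) 1).flatMap (fun l =>
            (PySem.List.pyRange (l+1) (n-1) 1).flatMap (fun m =>
              if p l < p m ∧ p m < p (n-1) ∧ p l < p (n-1) then
                [q l + q m + q (n-1)] else []))).foldl max acc := (List.foldl_flatMap).symm
      _ = ((PySem.List.pyRange 0 (n-1) 1).flatMap (fun l =>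
            (PySem.List.pyRange 0 (n-1) 1).flatMap (fun m => pvGrd1 p q n l m))).foldl max acc := by
          rw [hKA]
      _ = ((PySem.List.pyRange 0 (n-1) 1).flatMap (fun m =>
            (PySem.List.pyRange 0 (n-1) 1).flatMap (fun l => pvGrd1 p q n l m))).foldl max acc :=
          List.Perm.foldl_eq (pvFlatMapSwap _ _ _) acc
      _ = ((PySem.List.pyRange 1 (n-1) 1).flatMap (fun m =>
            (PySem.List.pyRange 0 m 1).flatMap (fun l =>
              if p m < p (n-1) ∧ p l < p m then [q l + q m + q (n-1)] else []))).foldl max acc := by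
          rw [hKB]
      _ = (PySem.List.pyRange 1 (n-1) 1).foldl (fun a m =>
            ((PySem.List.pyRange 0 m 1).flatMap (fun l =>
              if p m < p (n-1) ∧ p l < p m then [q l + q m + q (n-1)] else [])).foldl max a) acc :=
          List.foldl_flatMap
      _ = _ := PySem.List.foldl_congr_mem _ _ _ acc (fun a m hm => (hstepm a m hm).symm)
  · rw [PySem.List.pyRange_one_eq_nil (show n-1 ≤ (0:Int) by omega),
        PySem.List.pyRange_one_eq_nil (show n-1 ≤ (1:Int) by omega)]
    rfl

def pvGrd2 (p q : Int → Int) (m r : Int) : List Int :=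
  if m < r ∧ p 0 < p m ∧ p m < p r ∧ p 0 < p r then [q 0 + q m + q r] else []

theorem pvFam2 (p q : Int → Int) (n acc : Int) :
    (PySem.List.pyRange (n-1) 0 (-1)).foldl (fun acc r =>
       (PySem.List.pyRange 1 r 1).foldl (fun a m =>
          if p 0 < p m ∧ p m < p r ∧ p 0 < p r then max a (q 0 + q m + q r) else a) acc) acc
    = (PySem.List.pyRange 1 (n-1) 1).foldl (fun acc m =>
        if p 0 < p m then
          match (PySem.List.pyRange (m+1) n 1).foldl (fun best r =>
              if p m < p r then
                match best with
                | none => some (q r)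
                | some v => if q r > v then some (q r) else best
              else best) none with
          | some v => max acc (q 0 + q m + v)
          | none => acc
        else acc) acc := by
  have hrev : PySem.List.pyRange (n-1) 0 (-1) = (PySem.List.pyRange 1 n 1).reverse := by
    rw [PySem.List.pyRange_neg_one_eq_reverse]; ring_nf
  by_cases hn : 1 ≤ n - 1
  · have hKA : (PySem.List.pyRange 1 n 1).flatMap (fun r =>
        (PySem.List.pyRange 1 r 1).flatMap (fun m =>
          if p 0 < p m ∧ p m < p r ∧ p 0 < p r then [q 0 + q m + q r] else []))
        = (PySem.List.pyRange 1 n 1).flatMap (fun r =>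
            (PySem.List.pyRange 1 n 1).flatMap (fun m => pvGrd2 p q m r)) := by
      apply pvFlatMapCongr; intro r hr
      obtain ⟨hr1, hr2⟩ := PySem.List.mem_pyRange_one.mp hr
      have hstep := pvFlatMapRangeHigh 1 r n (by omega) (by omega)
        (fun m => pvGrd2 p q m r)
        (fun x hx1 hx2 => by simp only [pvGrd2]; exact if_neg (fun h => absurd h.1 (by omega)))
      rw [hstep]
      apply pvFlatMapCongr; intro m hm
      obtain ⟨hm1, hm2⟩ := PySem.List.mem_pyRange_one.mp hm
      simp only [pvGrd2]
      by_cases hg : p 0 < p m ∧ p m < p r ∧ p 0 < p r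
      · rw [if_pos hg, if_pos ⟨show m < r by omega, hg⟩]
      · rw [if_neg hg, if_neg (fun h => hg h.2)]
    have hKB : (PySem.List.pyRange 1 n 1).flatMap (fun m =>
        (PySem.List.pyRange 1 n 1).flatMap (fun r => pvGrd2 p q m r))
        = (PySem.List.pyRange 1 (n-1) 1).flatMap (fun m =>
            (PySem.List.pyRange (m+1) n 1).flatMap (fun r =>
              if p 0 < p m ∧ p m < p r then [q 0 + q m + q r] else [])) := by
      have hstep := pvFlatMapRangeHigh 1 (n-1) n (by omega) (by omega)
        (fun m => (PySem.List.pyRange 1 n 1).flatMap (fun r => pvGrd2 p q m r))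
        (fun x hx1 hx2 => by
          rw [List.flatMap_eq_nil_iff]; intro r hrr
          have hmr := PySem.List.mem_pyRange_one.mp hrr
          simp only [pvGrd2]; exact if_neg (fun h => absurd h.1 (by omega)))
      rw [hstep]
      apply pvFlatMapCongr; intro m hm
      obtain ⟨hm1, hm2⟩ := PySem.List.mem_pyRange_one.mp hm
      have hstep2 := pvFlatMapRangeLow 1 (m+1) n (by omega) (by omega)
        (fun r => pvGrd2 p q m r)
        (fun x hx1 hx2 => by simp only [pvGrd2]; exact if_neg (fun h => absurd h.1 (by omega)))
      rw [hstep2]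
      apply pvFlatMapCongr; intro r hrr
      obtain ⟨hr1, hr2⟩ := PySem.List.mem_pyRange_one.mp hrr
      simp only [pvGrd2]
      by_cases h1 : p 0 < p m
      · by_cases h2 : p m < p r
        · rw [if_pos ⟨show m < r by omega, h1, h2, lt_trans h1 h2⟩, if_pos ⟨h1, h2⟩]
        · rw [if_neg (fun h => h2 h.2.2.1), if_neg (fun h => h2 h.2)]
      · rw [if_neg (fun h => h1 h.2.1), if_neg (fun h => h1 h.1)]
    have hstepm : ∀ (a m : Int), m ∈ PySem.List.pyRange 1 (n-1) 1 →
        (if p 0 < p m then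
          match (PySem.List.pyRange (m+1) n 1).foldl (fun best r =>
              if p m < p r then
                match best with
                | none => some (q r)
                | some v => if q r > v then some (q r) else best
              else best) none with
          | some v => max a (q 0 + q m + v)
          | none => a
        else a)
        = ((PySem.List.pyRange (m+1) n 1).flatMap (fun r =>
            if p 0 < p m ∧ p m < p r then [q 0 + q m + q r] else [])).foldl max a := by
      intro a m _
      rw [pvBestFold (fun r => p m < p r) q (fun v => q 0 + q m + v)
        (fun x y h => by dsimp; omega) (PySem.List.pyRange (m+1) n 1) none a]
      have hred : (match (none : Option Int) with
        | some v => max a (q 0 + q m + v) | none => a) = a := rfl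
      rw [hred, pvIfFold (p 0 < p m) (fun r => p m < p r)
        (fun r => q 0 + q m + q r) (PySem.List.pyRange (m+1) n 1) a]
      exact pvFoldlMaxIf _ _ _ a
    calc (PySem.List.pyRange (n-1) 0 (-1)).foldl (fun acc r =>
           (PySem.List.pyRange 1 r 1).foldl (fun a m =>
              if p 0 < p m ∧ p m < p r ∧ p 0 < p r then max a (q 0 + q m + q r) else a) acc) acc
        = ((PySem.List.pyRange 1 n 1).reverse).foldl (fun acc r =>
           (PySem.List.pyRange 1 r 1).foldl (fun a m =>
              if p 0 < p m ∧ p m < p r ∧ p 0 < p r then max a (q 0 + q m + q r) else a) acc) acc := by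
          rw [hrev]
      _ = ((PySem.List.pyRange 1 n 1).reverse).foldl (fun a r =>
            ((PySem.List.pyRange 1 r 1).flatMap (fun m =>
              if p 0 < p m ∧ p m < p r ∧ p 0 < p r then [q 0 + q m + q r] else [])).foldl max a) acc :=
          PySem.List.foldl_congr_mem _ _ _ acc (fun a r _ => pvFoldlMaxIf _ _ _ a)
      _ = (((PySem.List.pyRange 1 n 1).reverse).flatMap (fun r =>
            (PySem.List.pyRange 1 r 1).flatMap (fun m =>
              if p 0 < p m ∧ p m < p r ∧ p 0 < p r then [q 0 + q m + q r] else []))).foldl max acc :=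
          (List.foldl_flatMap).symm
      _ = ((PySem.List.pyRange 1 n 1).flatMap (fun r =>
            (PySem.List.pyRange 1 r 1).flatMap (fun m =>
              if p 0 < p m ∧ p m < p r ∧ p 0 < p r then [q 0 + q m + q r] else []))).foldl max acc :=
          List.Perm.foldl_eq ((List.reverse_perm _).flatMap (fun x _ => List.Perm.refl _)) acc
      _ = ((PySem.List.pyRange 1 n 1).flatMap (fun r =>
            (PySem.List.pyRange 1 n 1).flatMap (fun m => pvGrd2 p q m r))).foldl max acc := by
          rw [hKA]
      _ = ((PySem.List.pyRange 1 n 1).flatMap (fun m =>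
            (PySem.List.pyRange 1 n 1).flatMap (fun r => pvGrd2 p q m r))).foldl max acc :=
          List.Perm.foldl_eq (pvFlatMapSwap _ _ (fun r m => pvGrd2 p q m r)) acc
      _ = ((PySem.List.pyRange 1 (n-1) 1).flatMap (fun m =>
            (PySem.List.pyRange (m+1) n 1).flatMap (fun r =>
              if p 0 < p m ∧ p m < p r then [q 0 + q m + q r] else []))).foldl max acc := by
          rw [hKB]
      _ = (PySem.List.pyRange 1 (n-1) 1).foldl (fun a m =>
            ((PySem.List.pyRange (m+1) n 1).flatMap (fun r =>
              if p 0 < p m ∧ p m < p r then [q 0 + q m + q r] else [])).foldl max a) acc :=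
          List.foldl_flatMap
      _ = _ := PySem.List.foldl_congr_mem _ _ _ acc (fun a m hm => (hstepm a m hm).symm)
  · rw [PySem.List.pyRange_neg_one_eq_nil (show n-1 ≤ (0:Int) by omega),
        PySem.List.pyRange_one_eq_nil (show n-1 ≤ (1:Int) by omega)]
    rfl

-- ---- B-side: frontier semantics ----

def pvOins (b : Option Int) (v : Int) : Option Int :=
  match b with
  | none => some v
  | some w => some (max w v)

def pvStep (x : Int) (b : Option Int) (e : Int × Int) : Option Int :=
  if e.1 < x then pvOins b e.2 else b

-- semantic value of a pair list: running max of profits among entries with price < x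
def pvSem (L : List (Int × Int)) (x : Int) : Option Int := L.foldl (pvStep x) none

def pvInv (fr : List (Int × Int)) : Prop :=
  List.Pairwise (fun a b => a.1 < b.1 ∧ a.2 < b.2) fr

theorem pvStep_oins (x : Int) (b : Option Int) (v : Int) (e : Int × Int) :
    pvStep x (pvOins b v) e = pvOins (pvStep x b e) v := by
  unfold pvStep pvOins
  by_cases h : e.1 < x <;> cases b <;> simp [h] <;> omega

theorem pvFoldl_oins (x : Int) (L : List (Int × Int)) :
    ∀ (b : Option Int) (v : Int),
    L.foldl (pvStep x) (pvOins b v) = pvOins (L.foldl (pvStep x) b) v := by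
  induction L with
  | nil => intro b v; rfl
  | cons e L ih => intro b v; simp only [List.foldl_cons, pvStep_oins, ih]

theorem pvOins_oins_le (b : Option Int) (d v : Int) (h : d ≤ v) :
    pvOins (pvOins b d) v = pvOins b v := by
  cases b <;> simp [pvOins] <;> omega

theorem pvFoldl_dropped (x v : Int) (D : List (Int × Int)) :
    ∀ (B : List (Int × Int)) (b : Option Int), (∀ e ∈ D, e.2 ≤ v) →
    pvOins ((D ++ B).foldl (pvStep x) b) v = pvOins (B.foldl (pvStep x) b) v := by
  induction D with
  | nil => intro B b _; rfl
  | cons e D ih =>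
    intro B b hD
    simp only [List.cons_append, List.foldl_cons]
    by_cases h : e.1 < x
    · have : pvStep x b e = pvOins b e.2 := by simp [pvStep, h]
      rw [this, pvFoldl_oins, pvOins_oins_le _ _ _ (hD e (by simp)),
          ih B b (fun f hf => hD f (by simp [hf]))]
    · have : pvStep x b e = b := by simp [pvStep, h]
      rw [this, ih B b (fun f hf => hD f (by simp [hf]))]

theorem pvFoldl_mono (x : Int) (L : List (Int × Int)) :
    ∀ (w : Int), ∃ w', L.foldl (pvStep x) (some w) = some w' ∧ w ≤ w' := by
  induction L with
  | nil => intro w; exact ⟨w, rfl, le_refl w⟩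
  | cons e L ih =>
    intro w
    simp only [List.foldl_cons]
    by_cases h : e.1 < x
    · have : pvStep x (some w) e = some (max w e.2) := by simp [pvStep, pvOins, h]
      rw [this]
      obtain ⟨w', h1, h2⟩ := ih (max w e.2)
      exact ⟨w', h1, le_trans (le_max_left _ _) h2⟩
    · have : pvStep x (some w) e = some w := by simp [pvStep, h]
      rw [this]; exact ih w

theorem pvFoldl_ub (x : Int) (L : List (Int × Int)) :
    ∀ (b : Option Int) (e : Int × Int), e ∈ L → e.1 < x →
    ∃ w, L.foldl (pvStep x) b = some w ∧ e.2 ≤ w := by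
  induction L with
  | nil => intro b e he _; cases he
  | cons f L ih =>
    intro b e he hx
    simp only [List.foldl_cons]
    rcases List.mem_cons.mp he with rfl | he
    · have : pvStep x b e = pvOins b e.2 := by simp [pvStep, hx]
      rw [this]
      cases b with
      | none =>
        obtain ⟨w, h1, h2⟩ := pvFoldl_mono x L e.2
        exact ⟨w, by simpa [pvOins] using h1, h2⟩
      | some u =>
        obtain ⟨w, h1, h2⟩ := pvFoldl_mono x L (max u e.2)
        exact ⟨w, by simpa [pvOins] using h1, le_trans (le_max_right _ _) h2⟩
    · exact ih (pvStep x b f) e he hx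

theorem pvFoldl_some_mem (x : Int) (L : List (Int × Int)) :
    ∀ (b : Option Int) (w : Int), L.foldl (pvStep x) b = some w →
    b = some w ∨ ∃ e ∈ L, e.1 < x ∧ e.2 = w := by
  induction L with
  | nil => intro b w h; exact Or.inl h
  | cons f L ih =>
    intro b w h
    simp only [List.foldl_cons] at h
    rcases ih (pvStep x b f) w h with h' | ⟨e, he, h1, h2⟩
    · by_cases hx : f.1 < x
      · cases b with
        | none =>
          simp [pvStep, pvOins, hx] at h'
          exact Or.inr ⟨f, by simp, hx, h'⟩
        | some u =>
          simp [pvStep, pvOins, hx] at h'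
          rcases max_choice u f.2 with hm | hm
          · exact Or.inl (by rw [← h', hm])
          · exact Or.inr ⟨f, by simp, hx, by omega⟩
      · simp [pvStep, hx] at h'
        exact Or.inl h'
    · exact Or.inr ⟨e, by simp [he], h1, h2⟩

-- key step: inserting into the frontier has exactly the one-pair semantics
theorem pvFoldl_skip (x : Int) (D : List (Int × Int)) (b : Option Int)
    (hD : ∀ e ∈ D, ¬ e.1 < x) : D.foldl (pvStep x) b = b := by
  rw [PySem.List.foldl_congr_mem D _ (fun b _ => b) b
    (fun b e he => by simp [pvStep, hD e he])]
  exact PySem.List.foldl_ignore _ _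

theorem pvPost_ge (fr : List (Int × Int)) (p : Int) (h : pvInv fr) :
    ∀ e ∈ fr.dropWhile (fun e => e.1 < p), p ≤ e.1 := by
  cases hP : fr.dropWhile (fun e => decide (e.1 < p)) with
  | nil => simp
  | cons h0 t =>
    have hh0 : ¬ (h0.1 < p) := by
      have := List.head?_dropWhile_not (fun e : Int × Int => decide (e.1 < p)) fr
      rw [hP] at this; simp at this; omega
    have hPW : List.Pairwise (fun a b : Int × Int => a.1 < b.1 ∧ a.2 < b.2) (h0 :: t) := by
      rw [← hP]; exact h.sublist (List.dropWhile_sublist _)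
    intro e he
    rcases List.mem_cons.mp he with rfl | he
    · omega
    · have := (List.pairwise_cons.mp hPW).1 e he
      omega

theorem pvInsert_sem (fr : List (Int × Int)) (p v x : Int) (hInv : pvInv fr) :
    pvSem (pvInsert fr p v) x = pvStep x (pvSem fr x) (p, v) := by
  unfold pvInsert
  simp only []
  set pre := fr.takeWhile (fun e => e.1 < p) with hpre
  set post := fr.dropWhile (fun e => e.1 < p) with hpost
  have hfr : pre ++ post = fr := List.takeWhile_append_dropWhile
  by_cases h1 : (match pre.getLast? with | some e => decide (v ≤ e.2) | none => false) = true
  · -- dominated by the last smaller-price entry: frontier unchanged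
    rw [if_pos h1]
    by_cases hx : p < x
    · obtain ⟨e, he, hev⟩ : ∃ e, pre.getLast? = some e ∧ v ≤ e.2 := by
        cases hL : pre.getLast? with
        | none => rw [hL] at h1; simp at h1
        | some e => rw [hL] at h1; exact ⟨e, rfl, by simpa using h1⟩
      have hmem : e ∈ fr := by
        rw [← hfr]; exact List.mem_append_left _ (List.mem_of_getLast? he)
      have hep : e.1 < p := by
        have := List.mem_takeWhile_imp (List.mem_of_getLast? he)
        simpa using this
      obtain ⟨w, hw, hew⟩ := pvFoldl_ub x fr none e hmem (by omega)
      show pvSem fr x = pvStep x (pvSem fr x) (p, v)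
      rw [show pvSem fr x = some w from hw]
      simp [pvStep, pvOins, hx]
      omega
    · simp [pvStep, hx]
  · rw [if_neg h1]
    by_cases h2 : (match post.head? with
        | some e => e.1 == p && decide (v ≤ e.2) | none => false) = true
    · -- an equal-price entry with at least this profit is already there
      rw [if_pos h2]
      by_cases hx : p < x
      · obtain ⟨e, he, hep, hev⟩ : ∃ e, post.head? = some e ∧ e.1 = p ∧ v ≤ e.2 := by
          cases hL : post.head? with
          | none => rw [hL] at h2; simp at h2
          | some e =>
            rw [hL] at h2; simp at h2
            exact ⟨e, rfl, h2.1, h2.2⟩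
        have hmem : e ∈ fr := by
          rw [← hfr]; exact List.mem_append_right _ (List.mem_of_mem_head? (by simp [he]))
        obtain ⟨w, hw, hew⟩ := pvFoldl_ub x fr none e hmem (by omega)
        show pvSem fr x = pvStep x (pvSem fr x) (p, v)
        rw [show pvSem fr x = some w from hw]
        simp [pvStep, pvOins, hx]
        omega
      · simp [pvStep, hx]
    · rw [if_neg h2]
      set dropped := post.takeWhile (fun e => e.2 ≤ v) with hdropped
      set post' := post.dropWhile (fun e => e.2 ≤ v) with hpost'
      have hpostsplit : dropped ++ post' = post := List.takeWhile_append_dropWhile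
      have hsem : pvSem fr x = (dropped ++ post').foldl (pvStep x)
          (pre.foldl (pvStep x) none) := by
        rw [← hfr, ← hpostsplit]; unfold pvSem; rw [List.foldl_append]
      have hsemL : pvSem (pre ++ (p, v) :: post') x
          = ((p, v) :: post').foldl (pvStep x) (pre.foldl (pvStep x) none) := by
        unfold pvSem; rw [List.foldl_append]
      by_cases hx : p < x
      · have hD : ∀ e ∈ dropped, e.2 ≤ v := fun e he => by
          simpa using List.mem_takeWhile_imp he
        have key := pvFoldl_dropped x v dropped post' (pre.foldl (pvStep x) none) hD
        rw [hsemL, hsem]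
        show ((p, v) :: post').foldl (pvStep x) (pre.foldl (pvStep x) none)
          = pvStep x ((dropped ++ post').foldl (pvStep x) (pre.foldl (pvStep x) none)) (p, v)
        rw [List.foldl_cons,
            show pvStep x (pre.foldl (pvStep x) none) (p, v)
              = pvOins (pre.foldl (pvStep x) none) v from by simp [pvStep, hx],
            pvFoldl_oins,
            show ∀ b, pvStep x b (p, v) = pvOins b v from fun b => by simp [pvStep, hx],
            key]
      · have hDskip : ∀ e ∈ dropped, ¬ e.1 < x := by
          intro e he
          have hpost : e ∈ post := (List.takeWhile_sublist _).mem he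
          have := pvPost_ge fr p hInv e hpost
          omega
        rw [hsemL, hsem, List.foldl_append,
            pvFoldl_skip x dropped _ hDskip, List.foldl_cons,
            show pvStep x (pre.foldl (pvStep x) none) (p, v)
              = pre.foldl (pvStep x) none from by simp [pvStep, hx],
            show ∀ b, pvStep x b (p, v) = b from fun b => by simp [pvStep, hx]]

theorem pvInsert_inv (fr : List (Int × Int)) (p v : Int) (h : pvInv fr) :
    pvInv (pvInsert fr p v) := by
  unfold pvInsert
  simp only []
  set pre := fr.takeWhile (fun e => e.1 < p) with hpre
  set post := fr.dropWhile (fun e => e.1 < p) with hpost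
  have hfr : pre ++ post = fr := List.takeWhile_append_dropWhile
  have hPWpre : List.Pairwise (fun a b : Int × Int => a.1 < b.1 ∧ a.2 < b.2) pre :=
    h.sublist (by rw [hpre]; exact List.takeWhile_sublist _)
  have hPWpost : List.Pairwise (fun a b : Int × Int => a.1 < b.1 ∧ a.2 < b.2) post :=
    h.sublist (by rw [hpost]; exact List.dropWhile_sublist _)
  have hcross : ∀ a ∈ pre, ∀ b ∈ post, a.1 < b.1 ∧ a.2 < b.2 := by
    have := (List.pairwise_append.mp (show List.Pairwise _ (pre ++ post) by
      rw [hfr]; exact h)).2.2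
    exact this
  have hprelt : ∀ e ∈ pre, e.1 < p := fun e he => by
    simpa using List.mem_takeWhile_imp he
  by_cases h1 : (match pre.getLast? with | some e => decide (v ≤ e.2) | none => false) = true
  · rw [if_pos h1]; exact h
  · rw [if_neg h1]
    by_cases h2 : (match post.head? with
        | some e => e.1 == p && decide (v ≤ e.2) | none => false) = true
    · rw [if_pos h2]; exact h
    · rw [if_neg h2]
      set post' := post.dropWhile (fun e => e.2 ≤ v) with hpost'
      have hpost'sub : post'.Sublist post := by rw [hpost']; exact List.dropWhile_sublist _
      have hPWpost' : List.Pairwise (fun a b : Int × Int => a.1 < b.1 ∧ a.2 < b.2) post' :=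
        hPWpost.sublist hpost'sub
      -- every pre entry has profit < v
      have hprev : ∀ e ∈ pre, e.2 < v := by
        intro e he
        cases hL : pre.getLast? with
        | none => rw [List.getLast?_eq_none_iff] at hL; rw [hL] at he; cases he
        | some e0 =>
          have he0v : e0.2 < v := by
            rw [hL] at h1; simp at h1; omega
          have hne : pre ≠ [] := by
            intro hh; rw [hh] at hL; simp at hL
          have hdecomp : pre.dropLast ++ [pre.getLast hne] = pre :=
            List.dropLast_append_getLast hne
          have he0 : pre.getLast hne = e0 := by
            have := List.getLast?_eq_some_getLast (l := pre) hne
            rw [hL] at this; exact (Option.some_injective _ this.symm)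
          rcases (by rw [← hdecomp] at he; exact List.mem_append.mp he) with hd | hd
          · have := (List.pairwise_append.mp (by rw [hdecomp]; exact hPWpre)).2.2
            have := this e hd (pre.getLast hne) (by simp)
            rw [he0] at this; omega
          · simp at hd; rw [hd, he0]; omega
      -- every post' entry has price > p and profit > v
      have hpost'gt : ∀ e ∈ post', p < e.1 ∧ v < e.2 := by
        intro e he
        constructor
        · -- price
          cases hp0 : post with
          | nil => rw [hp0] at hpost'sub; simp at hpost'sub
                   rw [hpost'sub] at he; cases he
          | cons h0 t =>
            have hh0p : p ≤ h0.1 := by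
              have := pvPost_ge fr p h h0 (by rw [← hpost, hp0]; simp)
              exact this
            by_cases heq : h0.1 = p
            · -- head has equal price; since ¬h2 it is dominated, hence dropped
              have hh0v : h0.2 ≤ v := by
                rw [hp0] at h2; simp at h2
                have := h2 (by omega)
                omega
              have : post' = t.dropWhile (fun e => e.2 ≤ v) := by
                rw [hpost', hp0]; simp [hh0v]
              have het : e ∈ t := ((List.dropWhile_sublist _).mem (this ▸ he))
              have := (List.pairwise_cons.mp (by rw [← hp0]; exact hPWpost)).1 e het
              omega
            · have hep : e ∈ post := hpost'sub.mem he
              rw [hp0] at hep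
              rcases List.mem_cons.mp hep with rfl | het
              · omega
              · have := (List.pairwise_cons.mp (by rw [← hp0]; exact hPWpost)).1 e het
                omega
        · -- profit
          cases hq : post' with
          | nil => rw [hq] at he; cases he
          | cons g0 u =>
            have hg0 : ¬ (g0.2 ≤ v) := by
              have := List.head?_dropWhile_not (fun e : Int × Int => decide (e.2 ≤ v)) post
              rw [← hpost', hq] at this; simpa using this
            rw [hq] at he
            rcases List.mem_cons.mp he with rfl | he
            · omega
            · have := (List.pairwise_cons.mp (by rw [← hq]; exact hPWpost')).1 e he
              omega
      -- assemble
      rw [pvInv, List.pairwise_append]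
      refine ⟨hPWpre, ?_, ?_⟩
      · rw [List.pairwise_cons]
        exact ⟨fun e he => ⟨(hpost'gt e he).1, (hpost'gt e he).2⟩, hPWpost'⟩
      · intro a ha b hb
        rcases List.mem_cons.mp hb with rfl | hb
        · exact ⟨hprelt a ha, hprev a ha⟩
        · exact hcross a ha b (hpost'sub.mem hb)

theorem pvQuery_eq_sem (fr : List (Int × Int)) (x : Int) (h : pvInv fr) :
    pvQuery fr x = pvSem fr x := by
  induction fr using List.reverseRecOn with
  | nil => rfl
  | append_singleton L e ih =>
    have hL : pvInv L := h.sublist (by simp)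
    have hQ : pvQuery (L ++ [e]) x
        = if e.1 < x then some e.2 else pvQuery L x := by
      unfold pvQuery
      rw [List.reverse_append]
      rfl
    have hS : pvSem (L ++ [e]) x = pvStep x (pvSem L x) e := by
      unfold pvSem; rw [List.foldl_append]; rfl
    rw [hQ, hS, ← ih hL]
    by_cases hx : e.1 < x
    · rw [if_pos hx, ih hL]
      unfold pvStep
      rw [if_pos hx]
      cases hw : pvSem L x with
      | none => rfl
      | some w =>
        rcases pvFoldl_some_mem x L none w hw with hww | ⟨f, hf, _, hfw⟩
        · cases hww
        · have := (List.pairwise_append.mp h).2.2 f hf e (by simp)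
          simp [pvOins]
          omega
    · rw [if_neg hx, ih hL]
      unfold pvStep
      rw [if_neg hx]

theorem pvStep_comm (x : Int) (b : Option Int) (e1 e2 : Int × Int) :
    pvStep x (pvStep x b e1) e2 = pvStep x (pvStep x b e2) e1 := by
  unfold pvStep pvOins
  by_cases h1 : e1.1 < x <;> by_cases h2 : e2.1 < x <;> cases b <;> simp [h1, h2] <;> omega

theorem pvSem_perm {L L' : List (Int × Int)} (h : L.Perm L') (x : Int) :
    pvSem L x = pvSem L' x := by
  unfold pvSem
  exact h.foldl_eq' (fun a _ b _ z => pvStep_comm x z a b) none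

-- the naive best-partner fold of the per-middle form IS pvSem of the mapped pairs
theorem pvNaive_eq_sem (R : List Int) (pp qq : Int → Int) (x : Int) :
    R.foldl (fun best l =>
      if pp l < x then
        match best with
        | none => some (qq l)
        | some v => if qq l > v then some (qq l) else best
      else best) none
    = pvSem (R.map (fun l => (pp l, qq l))) x := by
  unfold pvSem
  rw [List.foldl_map]
  refine PySem.List.foldl_congr_mem R _ _ none (fun b l _ => ?_)
  unfold pvStep pvOins
  by_cases hx : pp l < x
  · cases b with
    | none => simp [hx]
    | some w =>
      simp only [hx, if_pos]
      by_cases hv : qq l > w <;> simp [hv] <;> omega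
  · cases b <;> simp [hx]

-- ---- loop lemmas: each sweep of B computes the per-middle semantic form ----

theorem pvLoop1 (p q : Int → Int) (n : Int) :
    ∀ (k : Nat) (s : Int), (n - 1 - s).toNat ≤ k → 1 ≤ s →
    ∀ (fr : List (Int × Int)) (acc : Int), pvInv fr →
    (∀ x, pvSem fr x = pvSem ((PySem.List.pyRange 0 (s-1) 1).map (fun l => (p l, q l))) x) →
    ((PySem.List.pyRange s (n-1) 1).foldl (fun st m =>
        (pvInsert st.1 (p (m-1)) (q (m-1)),
         if p m < p (n-1) then
           match pvQuery (pvInsert st.1 (p (m-1)) (q (m-1))) (p m) with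
           | some b => max st.2 (b + q m + q (n-1))
           | none => st.2
         else st.2)) (fr, acc)).2
    = (PySem.List.pyRange s (n-1) 1).foldl (fun acc m =>
        if p m < p (n-1) then
          match pvSem ((PySem.List.pyRange 0 m 1).map (fun l => (p l, q l))) (p m) with
          | some v => max acc (v + q m + q (n-1))
          | none => acc
        else acc) acc := by
  intro k
  induction k with
  | zero =>
    intro s hk _ fr acc _ _
    rw [PySem.List.pyRange_one_eq_nil (by omega : n - 1 ≤ s)]
    rfl
  | succ k ih =>
    intro s hk hs fr acc hInv hsem
    by_cases hlt : s < n - 1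
    · rw [PySem.List.pyRange_one_cons hlt]
      simp only [List.foldl_cons]
      have hInv' : pvInv (pvInsert fr (p (s-1)) (q (s-1))) := pvInsert_inv _ _ _ hInv
      have hsem' : ∀ x, pvSem (pvInsert fr (p (s-1)) (q (s-1))) x
          = pvSem ((PySem.List.pyRange 0 s 1).map (fun l => (p l, q l))) x := by
        intro x
        rw [pvInsert_sem _ _ _ _ hInv, hsem x]
        have hsplit : PySem.List.pyRange 0 s 1
            = PySem.List.pyRange 0 (s-1) 1 ++ [s-1] := by
          have := PySem.List.pyRange_one_succ_right (a := 0) (b := s-1) (by omega)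
          rw [show s - 1 + 1 = s by omega] at this
          exact this
        rw [hsplit, List.map_append]
        unfold pvSem
        rw [List.foldl_append]
        rfl
      have hq : pvQuery (pvInsert fr (p (s-1)) (q (s-1))) (p s)
          = pvSem ((PySem.List.pyRange 0 s 1).map (fun l => (p l, q l))) (p s) := by
        rw [pvQuery_eq_sem _ _ hInv', hsem' (p s)]
      rw [ih (s+1) (by omega) (by omega) _ _ hInv'
            (by intro x; rw [show s + 1 - 1 = s by omega]; exact hsem' x)]
      simp only [hq]
    · rw [PySem.List.pyRange_one_eq_nil (by omega : n - 1 ≤ s)]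
      rfl

theorem pvLoop2 (p q : Int → Int) (n : Int) :
    ∀ (k : Nat) (s : Int), s.toNat ≤ k → s ≤ n - 2 →
    ∀ (fr : List (Int × Int)) (acc : Int), pvInv fr →
    (∀ x, pvSem fr x
      = pvSem (((PySem.List.pyRange (s+2) n 1).map (fun r => (-(p r), q r))).reverse) x) →
    ((PySem.List.pyRange s 0 (-1)).foldl (fun st m =>
        (pvInsert st.1 (-(p (m+1))) (q (m+1)),
         if p 0 < p m then
           match pvQuery (pvInsert st.1 (-(p (m+1))) (q (m+1))) (-(p m)) with
           | some b => max st.2 (q 0 + q m + b)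
           | none => st.2
         else st.2)) (fr, acc)).2
    = (PySem.List.pyRange s 0 (-1)).foldl (fun acc m =>
        if p 0 < p m then
          match pvSem ((PySem.List.pyRange (m+1) n 1).map (fun r => (-(p r), q r))) (-(p m)) with
          | some v => max acc (q 0 + q m + v)
          | none => acc
        else acc) acc := by
  intro k
  induction k with
  | zero =>
    intro s hk _ fr acc _ _
    rw [PySem.List.pyRange_neg_one_eq_nil (by omega : s ≤ 0)]
    rfl
  | succ k ih =>
    intro s hk hsn fr acc hInv hsem
    by_cases hpos : 0 < s
    · rw [PySem.List.pyRange_neg_one_cons hpos]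
      simp only [List.foldl_cons]
      have hInv' : pvInv (pvInsert fr (-(p (s+1))) (q (s+1))) := pvInsert_inv _ _ _ hInv
      have hsem' : ∀ x, pvSem (pvInsert fr (-(p (s+1))) (q (s+1))) x
          = pvSem (((PySem.List.pyRange (s+1) n 1).map (fun r => (-(p r), q r))).reverse) x := by
        intro x
        rw [pvInsert_sem _ _ _ _ hInv, hsem x]
        have hsplit : PySem.List.pyRange (s+1) n 1
            = (s+1) :: PySem.List.pyRange (s+2) n 1 := by
          rw [PySem.List.pyRange_one_cons (by omega : s + 1 < n)]
          ring_nf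
        rw [hsplit]
        simp only [List.map_cons, List.reverse_cons]
        unfold pvSem
        rw [List.foldl_append]
        rfl
      have hq : pvQuery (pvInsert fr (-(p (s+1))) (q (s+1))) (-(p s))
          = pvSem ((PySem.List.pyRange (s+1) n 1).map (fun r => (-(p r), q r))) (-(p s)) := by
        rw [pvQuery_eq_sem _ _ hInv', hsem' (-(p s)),
            pvSem_perm (List.reverse_perm _) (-(p s))]
      rw [ih (s-1) (by omega) (by omega) _ _ hInv'
            (by intro x; rw [show s - 1 + 2 = s + 1 by omega]; exact hsem' x)]
      simp only [hq]
    · rw [PySem.List.pyRange_neg_one_eq_nil (by omega : s ≤ 0)]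
      rfl

-- ===== VERDICT (by name: the statement is the Claim_ definition above) =====
theorem max_profit_threes_spec : Claim_equal_max_profit_threes := by
  intro prices profit _ _
  unfold Spec_max_profit_threes max_profit_threes max_profit_threes_alt
  dsimp only
  rw [pvFam1 (fun i => PySem.List.pyGetD prices i 0) (fun i => PySem.List.pyGetD profit i 0)
        (PySem.List.len prices) (-1),
      pvFam2 (fun i => PySem.List.pyGetD prices i 0) (fun i => PySem.List.pyGetD profit i 0)
        (PySem.List.len prices)]
  -- (1) B family 1 equals the per-middle semantic fold
  have hB1 := pvLoop1 (fun i => PySem.List.pyGetD prices i 0)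
      (fun i => PySem.List.pyGetD profit i 0) (PySem.List.len prices)
      ((PySem.List.len prices - 1 - 1).toNat) 1 (le_refl _) (le_refl 1) [] (-1)
      List.Pairwise.nil
      (fun x => by
        rw [show (1:Int) - 1 = 0 by norm_num, PySem.List.pyRange_one_eq_nil (le_refl 0)]
        rfl)
  rw [hB1]
  -- (2) B family 2 equals the per-middle semantic fold (descending order)
  have hB2 := pvLoop2 (fun i => PySem.List.pyGetD prices i 0)
      (fun i => PySem.List.pyGetD profit i 0) (PySem.List.len prices)
      ((PySem.List.len prices - 2).toNat) (PySem.List.len prices - 2) (le_refl _)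
      (le_refl _) []
  rw [hB2 _ List.Pairwise.nil
      (fun x => by
        rw [show PySem.List.len prices - 2 + 2 = PySem.List.len prices by ring,
            PySem.List.pyRange_one_eq_nil (le_refl _)]
        rfl)]
  -- (3) A family 1: naive best-partner fold = semantic fold
  rw [PySem.List.foldl_congr_mem (PySem.List.pyRange 1 (PySem.List.len prices - 1) 1) _
      (fun acc m =>
        if PySem.List.pyGetD prices m 0 < PySem.List.pyGetD prices (PySem.List.len prices - 1) 0 then
          match pvSem ((PySem.List.pyRange 0 m 1).map
              (fun l => (PySem.List.pyGetD prices l 0, PySem.List.pyGetD profit l 0)))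
              (PySem.List.pyGetD prices m 0) with
          | some v => max acc (v + PySem.List.pyGetD profit m 0 +
              PySem.List.pyGetD profit (PySem.List.len prices - 1) 0)
          | none => acc
        else acc) (-1)
      (fun a m _ => by
        dsimp only
        rw [pvNaive_eq_sem (PySem.List.pyRange 0 m 1)
          (fun l => PySem.List.pyGetD prices l 0) (fun l => PySem.List.pyGetD profit l 0)
          (PySem.List.pyGetD prices m 0)])]
  -- (4) A family 2: naive fold = semantic fold (pointwise in m)
  rw [PySem.List.foldl_congr_mem (PySem.List.pyRange 1 (PySem.List.len prices - 1) 1) _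
      (fun acc m =>
        if PySem.List.pyGetD prices 0 0 < PySem.List.pyGetD prices m 0 then
          match pvSem ((PySem.List.pyRange (m+1) (PySem.List.len prices) 1).map
              (fun r => (-(PySem.List.pyGetD prices r 0), PySem.List.pyGetD profit r 0)))
              (-(PySem.List.pyGetD prices m 0)) with
          | some v => max acc (PySem.List.pyGetD profit 0 0 + PySem.List.pyGetD profit m 0 + v)
          | none => acc
        else acc) _
      (fun a m _ => by
        dsimp only
        rw [PySem.List.foldl_congr_mem (PySem.List.pyRange (m+1) (PySem.List.len prices) 1) _
          (fun best r =>
            if -(PySem.List.pyGetD prices r 0) < -(PySem.List.pyGetD prices m 0) then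
              match best with
              | none => some (PySem.List.pyGetD profit r 0)
              | some v => if PySem.List.pyGetD profit r 0 > v
                  then some (PySem.List.pyGetD profit r 0) else best
            else best) none
          (fun b r _ => by
            dsimp only
            by_cases h : PySem.List.pyGetD prices m 0 < PySem.List.pyGetD prices r 0
            · rw [if_pos h, if_pos (by omega :
                -(PySem.List.pyGetD prices r 0) < -(PySem.List.pyGetD prices m 0))]
            · rw [if_neg h, if_neg (by omega :
                ¬ -(PySem.List.pyGetD prices r 0) < -(PySem.List.pyGetD prices m 0))]),
          pvNaive_eq_sem (PySem.List.pyRange (m+1) (PySem.List.len prices) 1)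
            (fun r => -(PySem.List.pyGetD prices r 0))
            (fun r => PySem.List.pyGetD profit r 0)
            (-(PySem.List.pyGetD prices m 0))])]
  -- (5) A family 2 ascending = B family 2 descending (the per-middle terms commute)
  have hrev : PySem.List.pyRange (PySem.List.len prices - 2) 0 (-1)
      = (PySem.List.pyRange 1 (PySem.List.len prices - 1) 1).reverse := by
    rw [PySem.List.pyRange_neg_one_eq_reverse]; ring_nf
  rw [hrev]
  refine List.Perm.foldl_eq' (List.reverse_perm _).symm ?_ _
  intro x _ y _ a
  dsimp only
  by_cases c1 : PySem.List.pyGetD prices 0 0 < PySem.List.pyGetD prices x 0 <;>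
    by_cases c2 : PySem.List.pyGetD prices 0 0 < PySem.List.pyGetD prices y 0 <;>
    cases pvSem ((PySem.List.pyRange (x+1) (PySem.List.len prices) 1).map
        (fun r => (-(PySem.List.pyGetD prices r 0), PySem.List.pyGetD profit r 0)))
        (-(PySem.List.pyGetD prices x 0)) <;>
    cases pvSem ((PySem.List.pyRange (y+1) (PySem.List.len prices) 1).map
        (fun r => (-(PySem.List.pyGetD prices r 0), PySem.List.pyGetD profit r 0)))
        (-(PySem.List.pyGetD prices y 0)) <;>
    simp [c1, c2] <;> first | omega | exact congrArg (max a) (max_comm _ _)
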